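-- pv_equiv track=rewrite | github.com/Plantatsrophe/dont-die | upgrade_ladders_v7_fixed.py | upgrade_ladders
-- ===== SOURCE A (Python) =====
-- def upgrade_ladders(map_rows):
--     num_rows = len(map_rows)
--     grid = [list(r) for r in map_rows]
--     upgraded = 0
--
--     # We scan each row and column, checking bounds correctly.
--     for r in range(num_rows):
--         row_len = len(grid[r])
--         for c in range(row_len):
--             if grid[r][c] == '2' or grid[r][c] == '9':
--                 # Check tile above
--                 curr_r = r - 1
--                 while curr_r >= 0 and c < len(grid[curr_r]) and grid[curr_r][c] in ['1', '6']:
--                     # Change platform to hybrid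
--                     if grid[curr_r][c] != '9':
--                         grid[curr_r][c] = '9'
--                         upgraded += 1
--                     curr_r -= 1
--                     # Note: We continue up to handle thick platforms
--
--     return ["".join(row) for row in grid], upgraded
-- ===== SOURCE B (Python) =====
-- def upgrade_ladders(map_rows):
--     out = []
--     active = []  # active[c]: column c can propagate an upgrade into the row above; missing -> False
--     upgraded = 0
--     for row in reversed(map_rows):
--         chars = []
--         new_active = []
--         for c, ch in enumerate(row):
--             if ch == '2' or ch == '9':
--                 new_active.append(True)
--             elif (ch == '1' or ch == '6') and c < len(active) and active[c]:
--                 ch = '9'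
--                 upgraded += 1
--                 new_active.append(True)
--             else:
--                 new_active.append(False)
--             chars.append(ch)
--         active = new_active
--         out.append(''.join(chars))
--     out.reverse()
--     return out, upgraded
-- ===== Notes on version B (the rewrite author's own statement) =====
-- stated objective: alternative
-- what changed: Replaced the trigger-driven nested upward while-scan over a mutable grid (for every '2'/'9' cell, climb and rewrite the column above) by a single bottom-up sweep over the rows that carries a per-column 'active' boolean list and converts each '1'/'6' cell as it is passed.
import Mathlib
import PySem

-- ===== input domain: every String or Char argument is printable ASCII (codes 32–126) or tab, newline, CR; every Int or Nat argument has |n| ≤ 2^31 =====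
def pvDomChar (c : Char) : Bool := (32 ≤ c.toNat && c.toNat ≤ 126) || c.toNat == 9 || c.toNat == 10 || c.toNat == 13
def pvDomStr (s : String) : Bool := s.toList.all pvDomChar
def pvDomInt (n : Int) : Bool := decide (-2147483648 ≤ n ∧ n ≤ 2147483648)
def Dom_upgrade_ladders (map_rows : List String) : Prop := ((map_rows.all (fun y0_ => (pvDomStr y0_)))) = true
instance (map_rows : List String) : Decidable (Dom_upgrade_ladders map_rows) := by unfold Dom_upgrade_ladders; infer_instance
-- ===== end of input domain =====

-- B replaces A's trigger-driven upward while-scans over a mutable grid by one bottom-up sweep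
-- carrying a per-column 'active' boolean list (objective: alternative single-pass decomposition).

-- ===== PORT A =====
-- the inner `while curr_r >= 0 and c < len(grid[curr_r]) and grid[curr_r][c] in ['1','6']` loop;
-- fuel k means curr_r = k - 1 (k = 0 ↔ curr_r < 0)
def climbA (grid : List (List Char)) (c : Nat) (upg : Int) : Nat → List (List Char) × Int
  | 0 => (grid, upg)
  | k + 1 =>
    let row := grid.getD k []
    if c < row.length ∧ (row.getD c ' ' = '1' ∨ row.getD c ' ' = '6') then
      if row.getD c ' ' ≠ '9' then
        climbA (grid.set k (row.set c '9')) c (upg + 1) k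
      else
        climbA grid c upg k
    else (grid, upg)

-- body of the `for c in range(row_len)` loop
def aColStep (r : Nat) (st : List (List Char) × Int) (c : Nat) : List (List Char) × Int :=
  let row := st.1.getD r []
  if row.getD c ' ' = '2' ∨ row.getD c ' ' = '9' then climbA st.1 c st.2 r
  else st

def upgrade_ladders (map_rows : List String) : List String × Int :=
  let grid := map_rows.map (fun r => r.toList)
  let st := (List.range map_rows.length).foldl
      (fun st r => (List.range ((st.1.getD r []).length)).foldl (aColStep r) st) (grid, 0)
  (st.1.map (fun row => String.mk row), st.2)

-- ===== PORT B =====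
-- the inner `for c, ch in enumerate(row)` loop: builds (chars, new_active, row count)
def bRowGo (active : List Bool) : List Char → Nat → List Char × List Bool × Int
  | [], _ => ([], [], 0)
  | ch :: rest, c =>
    let p := bRowGo active rest (c + 1)
    if ch == '2' || ch == '9' then (ch :: p.1, true :: p.2.1, p.2.2)
    else if (ch == '1' || ch == '6') && active.getD c false then ('9' :: p.1, true :: p.2.1, p.2.2 + 1)
    else (ch :: p.1, false :: p.2.1, p.2.2)

-- body of `for row in reversed(map_rows)`; `out.append` + the final `out.reverse()` is realised
-- by consing onto the accumulated output list
def bStep (st : List String × List Bool × Int) (row : String) : List String × List Bool × Int :=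
  let p := bRowGo st.2.1 row.toList 0
  (String.mk p.1 :: st.1, p.2.1, st.2.2 + p.2.2)

def upgrade_ladders_alt (map_rows : List String) : List String × Int :=
  let st := map_rows.reverse.foldl bStep ([], [], 0)
  (st.1, st.2.2)

-- ===== PRECONDITION & SPEC =====
def Spec_upgrade_ladders (map_rows : List String) (out : List String × Int) : Prop := out = upgrade_ladders_alt map_rows
instance (map_rows : List String) (out : List String × Int) : Decidable (Spec_upgrade_ladders map_rows out) := by unfold Spec_upgrade_ladders; infer_instance

-- ===== CLAIM (what is proved, stated in full; the proofs are below) =====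
def Claim_equal_upgrade_ladders : Prop := ∀ (map_rows : List String), Dom_upgrade_ladders map_rows → Spec_upgrade_ladders map_rows (upgrade_ladders map_rows)

-- ===== LEMMAS AND PROOFS =====

-- character classes
def lad (ch : Char) : Bool := ch == '1' || ch == '6'
def trig (ch : Char) : Bool := ch == '2' || ch == '9'

-- original cell lookup (out of range ⇒ ' ', which is neither lad nor trig)
def och (G : List (List Char)) (i c : Nat) : Char := (G.getD i []).getD c ' '

-- "supported from below": an in-range chain of '1'/'6' cells in column c down to a '2'/'9'
def suppL : List (List Char) → Nat → Bool
  | [], _ => false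
  | row :: rest, c =>
    if trig (row.getD c ' ') then true
    else if lad (row.getD c ' ') then suppL rest c
    else false

-- reference result: converted row, its count, the active list
def refRow (rest : List (List Char)) : List Char → Nat → List Char
  | [], _ => []
  | ch :: t, c => (if lad ch && suppL rest c then '9' else ch) :: refRow rest t (c + 1)

def refCntRow (rest : List (List Char)) : List Char → Nat → Int
  | [], _ => 0
  | ch :: t, c => (if lad ch && suppL rest c then (1 : Int) else 0) + refCntRow rest t (c + 1)

def refActRow (rest : List (List Char)) : List Char → Nat → List Bool
  | [], _ => []
  | ch :: t, c =>
    (if trig ch then true else if lad ch then suppL rest c else false) :: refActRow rest t (c + 1)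

def refRows : List (List Char) → List (List Char)
  | [] => []
  | row :: rest => refRow rest row 0 :: refRows rest

def refCnt : List (List Char) → Int
  | [] => 0
  | row :: rest => refCntRow rest row 0 + refCnt rest

def actOf : List (List Char) → List Bool
  | [] => []
  | row :: rest => refActRow rest row 0

-- tiny character facts
theorem lad_eq {ch : Char} (h : lad ch = true) : ch = '1' ∨ ch = '6' := by
  simpa [lad] using h

theorem trig_eq {ch : Char} (h : trig ch = true) : ch = '2' ∨ ch = '9' := by
  simpa [trig] using h

theorem lad_iff {ch : Char} : lad ch = true ↔ (ch = '1' ∨ ch = '6') := by simp [lad]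

theorem trig_iff {ch : Char} : trig ch = true ↔ (ch = '2' ∨ ch = '9') := by simp [trig]

theorem trig_not_lad {ch : Char} (h : trig ch = true) : lad ch = false := by
  rcases trig_eq h with rfl | rfl <;> decide

theorem lad_ne_nine {ch : Char} (h : lad ch = true) : ch ≠ '9' := by
  rcases lad_eq h with rfl | rfl <;> decide

theorem och_col_oob {G : List (List Char)} {i c : Nat} (h : (G.getD i []).length ≤ c) :
    och G i c = ' ' := by
  unfold och; rw [List.getD_eq_default _ _ h]

theorem lad_och_col {G : List (List Char)} {i c : Nat} (h : lad (och G i c) = true) :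
    c < (G.getD i []).length := by
  by_contra hc
  rw [och_col_oob (by omega)] at h
  simp [lad] at h

theorem trig_och_col {G : List (List Char)} {i c : Nat} (h : trig (och G i c) = true) :
    c < (G.getD i []).length := by
  by_contra hc
  rw [och_col_oob (by omega)] at h
  simp [trig] at h

-- getD over List.set
theorem getD_set {α : Type} (d : α) (g : List α) (k : Nat) (v : α) (i : Nat)
    (hk : k < g.length) :
    (g.set k v).getD i d = if i = k then v else g.getD i d := by
  rw [List.getD_eq_getElem?_getD, List.getD_eq_getElem?_getD, List.getElem?_set]
  by_cases h : i = k
  · subst h; simp [hk]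
  · rw [if_neg (fun hh => h hh.symm), if_neg h]

-- evaluation of one step of the climb
theorem climbA_stop (g : List (List Char)) (c : Nat) (u : Int) (k : Nat)
    (h : ¬ (c < (g.getD k []).length ∧
      ((g.getD k []).getD c ' ' = '1' ∨ (g.getD k []).getD c ' ' = '6'))) :
    climbA g c u (k + 1) = (g, u) := by
  rw [climbA]
  exact if_neg h

theorem climbA_go (g : List (List Char)) (c : Nat) (u : Int) (k : Nat)
    (hlt : c < (g.getD k []).length)
    (h16 : (g.getD k []).getD c ' ' = '1' ∨ (g.getD k []).getD c ' ' = '6')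
    (h9 : (g.getD k []).getD c ' ' ≠ '9') :
    climbA g c u (k + 1) = climbA (g.set k ((g.getD k []).set c '9')) c (u + 1) k := by
  rw [climbA]
  show (if _ ∧ _ then if _ then _ else _ else _) = _
  rw [if_pos ⟨hlt, h16⟩, if_pos h9]

-- ===== B = reference =====

theorem refActRow_getD (rest : List (List Char)) :
    ∀ (row : List Char) (c k : Nat),
      (refActRow rest row c).getD k false =
        (if trig (row.getD k ' ') then true
         else if lad (row.getD k ' ') then suppL rest (c + k) else false) := by
  intro row
  induction row with
  | nil =>
    intro c k
    simp [refActRow, List.getD, trig, lad]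
  | cons ch t ih =>
    intro c k
    cases k with
    | zero => simp [refActRow]
    | succ k =>
      have e2 : c + (k + 1) = (c + 1) + k := by omega
      simp only [refActRow, List.getD_cons_succ, e2]
      exact ih (c + 1) k

theorem actOf_getD (M : List (List Char)) : ∀ k, (actOf M).getD k false = suppL M k := by
  intro k
  cases M with
  | nil => simp [actOf, suppL, List.getD]
  | cons row rest =>
    show (refActRow rest row 0).getD k false = _
    rw [refActRow_getD rest row 0 k]
    simp [suppL]

theorem bRowGo_eq (rest : List (List Char)) (active : List Bool)
    (hact : ∀ k, active.getD k false = suppL rest k) :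
    ∀ (cs : List Char) (c : Nat),
      bRowGo active cs c = (refRow rest cs c, refActRow rest cs c, refCntRow rest cs c) := by
  intro cs
  induction cs with
  | nil => intro c; rfl
  | cons ch t ih =>
    intro c
    have e2 : (ch == '2' || ch == '9') = trig ch := rfl
    have e1 : (ch == '1' || ch == '6') = lad ch := rfl
    simp only [bRowGo, ih (c + 1), e2, e1, hact c]
    cases htr : trig ch
    · cases hlad : lad ch
      · simp [refRow, refActRow, refCntRow, htr, hlad]
      · cases hsup : suppL rest c
        · simp [refRow, refActRow, refCntRow, htr, hlad, hsup]
        · simp [refRow, refActRow, refCntRow, htr, hlad, hsup]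
          omega
    · simp [refRow, refActRow, refCntRow, htr, trig_not_lad htr]

theorem bFoldr :
    ∀ (L : List String),
      L.foldr (fun row st => bStep st row) ([], [], 0) =
        ((refRows (L.map (fun r => r.toList))).map (fun row => String.mk row),
          actOf (L.map (fun r => r.toList)),
          refCnt (L.map (fun r => r.toList))) := by
  intro L
  induction L with
  | nil => rfl
  | cons s L' ih =>
    simp only [List.foldr_cons, ih]
    show bStep _ s = _
    unfold bStep
    simp only []
    rw [bRowGo_eq (L'.map (fun r => r.toList)) _ (actOf_getD _)]
    simp [refRows, refCnt, actOf]
    omega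

theorem alt_eq_ref (L : List String) :
    upgrade_ladders_alt L =
      ((refRows (L.map (fun r => r.toList))).map (fun row => String.mk row),
        refCnt (L.map (fun r => r.toList))) := by
  unfold upgrade_ladders_alt
  rw [List.foldl_reverse, bFoldr]

-- ===== A = reference =====

-- chain of lad cells in column C from row i up to (excluding) row R
def chainT (G : List (List Char)) (C R i : Nat) : Prop :=
  ∀ m, i ≤ m → m < R → lad (och G m C) = true

-- cell (i,c) has been converted after processing all trigger positions lexicographically
-- before (R,C): some trigger at (r',c) with i < r' and an unbroken lad chain between
def ConvP (G : List (List Char)) (R C i c : Nat) : Prop :=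
  lad (och G i c) = true ∧
    ∃ r', i < r' ∧ r' ≤ R ∧ (r' < R ∨ c < C) ∧ trig (och G r' c) = true ∧
      ∀ m, i < m → m < r' → lad (och G m c) = true

-- grid g is the original G with exactly the cells in S rewritten to '9'
def GridIs (G g : List (List Char)) (S : Nat → Nat → Prop) : Prop :=
  g.length = G.length ∧ (∀ i, (g.getD i []).length = (G.getD i []).length) ∧
    ∀ i c, (S i c → (g.getD i []).getD c ' ' = '9') ∧
      (¬ S i c → (g.getD i []).getD c ' ' = och G i c)

def nines (g : List (List Char)) : Nat := (g.map (fun row => row.count '9')).sum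

theorem gridIs_congr {G g : List (List Char)} {S S' : Nat → Nat → Prop}
    (h : GridIs G g S) (he : ∀ i c, S i c ↔ S' i c) : GridIs G g S' := by
  refine ⟨h.1, h.2.1, fun i c => ⟨fun hs => (h.2.2 i c).1 ((he i c).mpr hs),
    fun hs => (h.2.2 i c).2 (fun hh => hs ((he i c).mp hh))⟩⟩

theorem convP_zero (G : List (List Char)) (i c : Nat) : ¬ ConvP G 0 0 i c := by
  rintro ⟨-, r', h1, h2, -, -, -⟩; omega

theorem convP_ge (G : List (List Char)) {R C i : Nat} (c : Nat) (h : R ≤ i) :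
    ¬ ConvP G R C i c := by
  rintro ⟨-, r', h1, h2, -, -, -⟩; omega

theorem convP_notrig {G : List (List Char)} {R C : Nat} (h : trig (och G R C) = false)
    (i c : Nat) : ConvP G R (C + 1) i c ↔ ConvP G R C i c := by
  constructor
  · rintro ⟨hl, r', h1, h2, h3, h4, h5⟩
    refine ⟨hl, r', h1, h2, ?_, h4, h5⟩
    rcases h3 with h3 | h3
    · exact Or.inl h3
    · by_cases hc : c < C
      · exact Or.inr hc
      · have : c = C := by omega
        subst this
        by_cases hr : r' < R
        · exact Or.inl hr
        · have : r' = R := by omega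
          subst this
          rw [h4] at h; exact absurd h (by simp)
  · rintro ⟨hl, r', h1, h2, h3, h4, h5⟩
    exact ⟨hl, r', h1, h2, by omega, h4, h5⟩

theorem convP_trig {G : List (List Char)} {R C : Nat} (h : trig (och G R C) = true)
    (i c : Nat) :
    ConvP G R (C + 1) i c ↔ (ConvP G R C i c ∨ (c = C ∧ i < R ∧ chainT G C R i)) := by
  constructor
  · rintro ⟨hl, r', h1, h2, h3, h4, h5⟩
    by_cases hr : r' < R ∨ c < C
    · exact Or.inl ⟨hl, r', h1, h2, hr, h4, h5⟩
    · push_neg at hr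
      have hrR : r' = R := by omega
      have hcC : c = C := by omega
      subst hrR; subst hcC
      refine Or.inr ⟨rfl, h1, fun m hm1 hm2 => ?_⟩
      by_cases hmi : m = i
      · subst hmi; exact hl
      · exact h5 m (by omega) hm2
  · rintro (⟨hl, r', h1, h2, h3, h4, h5⟩ | ⟨hc, hiR, hch⟩)
    · exact ⟨hl, r', h1, h2, by omega, h4, h5⟩
    · subst hc
      exact ⟨hch i le_rfl hiR, R, hiR, le_rfl, Or.inr (by omega), h,
        fun m hm1 hm2 => hch m (by omega) hm2⟩

theorem convP_rowend {G : List (List Char)} {R : Nat} (i c : Nat) :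
    ConvP G (R + 1) 0 i c ↔ ConvP G R ((G.getD R []).length) i c := by
  constructor
  · rintro ⟨hl, r', h1, h2, h3, h4, h5⟩
    have hr' : r' ≤ R := by omega
    refine ⟨hl, r', h1, hr', ?_, h4, h5⟩
    by_cases hr : r' < R
    · exact Or.inl hr
    · have : r' = R := by omega
      subst this
      exact Or.inr (trig_och_col h4)
  · rintro ⟨hl, r', h1, h2, h3, h4, h5⟩
    exact ⟨hl, r', h1, by omega, Or.inl (by omega), h4, h5⟩

theorem convP_closed {G : List (List Char)} {R C j c : Nat} (h : ConvP G R C j c)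
    {i : Nat} (hij : i < j) (hch : ∀ m, i ≤ m → m < j → lad (och G m c) = true) :
    ConvP G R C i c := by
  obtain ⟨hl, r', h1, h2, h3, h4, h5⟩ := h
  refine ⟨hch i le_rfl hij, r', by omega, h2, h3, h4, fun m hm1 hm2 => ?_⟩
  by_cases hmj : m < j
  · exact hch m (by omega) hmj
  · by_cases hmj' : m = j
    · subst hmj'; exact hl
    · exact h5 m (by omega) hm2

-- counting '9's
theorem count_set_nine (row : List Char) :
    ∀ C, C < row.length → row.getD C ' ' ≠ '9' →
      (row.set C '9').count '9' = row.count '9' + 1 := by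
  induction row with
  | nil => intro C h; simp at h
  | cons ch t ih =>
    intro C hC h9
    cases C with
    | zero =>
      have hch : ch ≠ '9' := by simpa [List.getD] using h9
      have h2 : ('9' == ch) = false := by
        cases hbe : ('9' == ch)
        · rfl
        · exact absurd (beq_iff_eq.mp hbe).symm hch
      simp [List.set, List.count_cons, h2, hch]
    | succ C =>
      simp only [List.set, List.count_cons]
      rw [ih C (by simpa using hC) (by simpa [List.getD] using h9)]
      omega

theorem nines_set (g : List (List Char)) :
    ∀ k, k < g.length → ∀ C, C < (g.getD k []).length → (g.getD k []).getD C ' ' ≠ '9' →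
      nines (g.set k ((g.getD k []).set C '9')) = nines g + 1 := by
  induction g with
  | nil => intro k h; simp at h
  | cons row rest ih =>
    intro k hk C hC h9
    cases k with
    | zero =>
      simp only [List.getD_cons_zero] at hC h9 ⊢
      simp only [List.set, nines, List.map_cons, List.sum_cons]
      rw [count_set_nine row C hC h9]
      omega
    | succ k =>
      simp only [List.getD_cons_succ] at hC h9 ⊢
      simp only [List.set, nines, List.map_cons, List.sum_cons]
      have := ih k (by simpa using hk) C hC h9
      simp only [nines] at this
      omega

-- the upward climb from a processed trigger at (R,C)
theorem climb_spec (G : List (List Char)) (R C : Nat) (hR : R ≤ G.length) :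
    ∀ (k : Nat) (g : List (List Char)) (u : Int),
      k ≤ R →
      (∀ m, k ≤ m → m < R → lad (och G m C) = true ∧ ¬ ConvP G R C m C) →
      GridIs G g (fun i c => ConvP G R C i c ∨ (c = C ∧ k ≤ i ∧ i < R ∧ chainT G C R i)) →
      GridIs G (climbA g C u k).1
          (fun i c => ConvP G R C i c ∨ (c = C ∧ i < R ∧ chainT G C R i)) ∧
        (climbA g C u k).2 - u = (nines (climbA g C u k).1 : Int) - (nines g : Int) := by
  intro k
  induction k with
  | zero =>
    intro g u _ _ hg
    refine ⟨gridIs_congr hg (fun i c => ⟨?_, ?_⟩), by simp [climbA]⟩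
    · rintro (h | ⟨h1, -, h3, h4⟩); exacts [Or.inl h, Or.inr ⟨h1, h3, h4⟩]
    · rintro (h | ⟨h1, h3, h4⟩); exacts [Or.inl h, Or.inr ⟨h1, Nat.zero_le _, h3, h4⟩]
  | succ k ih =>
    intro g u hkR hdesc hg
    have hkR' : k < R := by omega
    have hlen : (g.getD k []).length = (G.getD k []).length := hg.2.1 k
    have hkg : k < g.length := by rw [hg.1]; omega
    by_cases hconv : ConvP G R C k C
    · -- current cell already '9': the loop stops; everything claimed is already in ConvP
      have hcur : (g.getD k []).getD C ' ' = '9' := (hg.2.2 k C).1 (Or.inl hconv)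
      rw [climbA_stop g C u k (by
        rintro ⟨-, h16⟩
        rw [hcur] at h16
        rcases h16 with h | h <;> exact absurd h (by decide))]
      refine ⟨gridIs_congr hg (fun i c => ⟨?_, ?_⟩), by simp⟩
      · rintro (h | ⟨h1, h2, h3, h4⟩)
        · exact Or.inl h
        · exact Or.inr ⟨h1, h3, h4⟩
      · rintro (h | ⟨h1, h3, h4⟩)
        · exact Or.inl h
        · -- i ≤ k: closed under extending the chain downwards through (k,C)
          subst h1
          by_cases hik : k + 1 ≤ i
          · exact Or.inr ⟨rfl, hik, h3, h4⟩
          · left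
            by_cases hik' : i = k
            · subst hik'; exact hconv
            · exact convP_closed hconv (by omega)
                (fun m hm1 hm2 => h4 m hm1 (by omega))
    · have hcur : (g.getD k []).getD C ' ' = och G k C := by
        refine (hg.2.2 k C).2 ?_
        rintro (h | ⟨-, h2, -, -⟩)
        · exact hconv h
        · omega
      by_cases hlad : lad (och G k C) = true
      · -- convert this cell and continue climbing
        have hCG : C < (G.getD k []).length := lad_och_col hlad
        have hClt : C < (g.getD k []).length := by omega
        have hne9 : och G k C ≠ '9' := lad_ne_nine hlad
        rw [climbA_go g C u k hClt (by rw [hcur]; exact lad_iff.mp hlad)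
          (by rw [hcur]; exact hne9)]
        have hchk : chainT G C R k := by
          intro m hm1 hm2
          by_cases hmk : m = k
          · subst hmk; exact hlad
          · exact (hdesc m (by omega) hm2).1
        have hg2is : GridIs G (g.set k ((g.getD k []).set C '9'))
            (fun i c => ConvP G R C i c ∨ (c = C ∧ k ≤ i ∧ i < R ∧ chainT G C R i)) := by
          refine ⟨by simp [List.length_set, hg.1], fun i => ?_, fun i c => ?_⟩
          · rw [getD_set [] g k _ i hkg]
            by_cases hik : i = k
            · rw [if_pos hik, hik, List.length_set]; exact hlen
            · rw [if_neg hik]; exact hg.2.1 i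
          · rw [getD_set [] g k _ i hkg]
            by_cases hik : i = k
            · rw [if_pos hik, hik]
              rw [getD_set ' ' (g.getD k []) C '9' c hClt]
              by_cases hcC : c = C
              · subst hcC
                refine ⟨fun _ => by simp, fun hn => ?_⟩
                exact absurd (Or.inr ⟨rfl, le_rfl, hkR', hchk⟩) hn
              · simp only [if_neg hcC]
                have hp := hg.2.2 k c
                refine ⟨?_, ?_⟩
                · rintro (h | ⟨h1, -, -, -⟩)
                  · exact hp.1 (Or.inl h)
                  · exact absurd h1 hcC
                · intro hn
                  refine hp.2 ?_
                  rintro (h | ⟨h1, -, -, -⟩)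
                  · exact hn (Or.inl h)
                  · exact hcC h1
            · simp only [if_neg hik]
              have hp := hg.2.2 i c
              refine ⟨?_, ?_⟩
              · rintro (h | ⟨h1, h2, h3, h4⟩)
                · exact hp.1 (Or.inl h)
                · by_cases hik2 : k + 1 ≤ i
                  · exact hp.1 (Or.inr ⟨h1, hik2, h3, h4⟩)
                  · omega
              · intro hn
                refine hp.2 ?_
                rintro (h | ⟨h1, h2, h3, h4⟩)
                · exact hn (Or.inl h)
                · exact hn (Or.inr ⟨h1, by omega, h3, h4⟩)
        have hdesc2 : ∀ m, k ≤ m → m < R → lad (och G m C) = true ∧ ¬ ConvP G R C m C := by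
          intro m hm1 hm2
          by_cases hmk : m = k
          · subst hmk; exact ⟨hlad, hconv⟩
          · exact hdesc m (by omega) hm2
        obtain ⟨hfin, hcnt⟩ := ih (g.set k ((g.getD k []).set C '9')) (u + 1)
          (by omega) hdesc2 hg2is
        refine ⟨hfin, ?_⟩
        have hn2 : nines (g.set k ((g.getD k []).set C '9')) = nines g + 1 :=
          nines_set g k hkg C hClt (by rw [hcur]; exact hne9)
        rw [hn2] at hcnt
        push_cast at hcnt ⊢
        omega
      · -- chain broken here: the loop stops, and no cell at or below k has a chain
        rw [climbA_stop g C u k (by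
          rintro ⟨-, h16⟩
          rw [hcur] at h16
          exact hlad (lad_iff.mpr h16))]
        refine ⟨gridIs_congr hg (fun i c => ⟨?_, ?_⟩), by simp⟩
        · rintro (h | ⟨h1, h2, h3, h4⟩)
          · exact Or.inl h
          · exact Or.inr ⟨h1, h3, h4⟩
        · rintro (h | ⟨h1, h3, h4⟩)
          · exact Or.inl h
          · subst h1
            by_cases hik : k + 1 ≤ i
            · exact Or.inr ⟨rfl, hik, h3, h4⟩
            · exact absurd (h4 k (by omega) hkR') (by simpa using hlad)

-- the full-grid invariant carried by the two nested `for` loops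
def InvA (G : List (List Char)) (R C : Nat) (st : List (List Char) × Int) : Prop :=
  GridIs G st.1 (fun i c => ConvP G R C i c) ∧ st.2 = (nines st.1 : Int) - (nines G : Int)

theorem colStep_spec {G : List (List Char)} {R C : Nat} {st : List (List Char) × Int}
    (hR : R < G.length) (hC : C < (G.getD R []).length) (h : InvA G R C st) :
    InvA G R (C + 1) (aColStep R st C) := by
  have hcur : (st.1.getD R []).getD C ' ' = och G R C :=
    (h.1.2.2 R C).2 (convP_ge G C le_rfl)
  unfold aColStep
  simp only [hcur]
  by_cases ht : trig (och G R C) = true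
  · rw [if_pos (trig_iff.mp ht)]
    have hg0 : GridIs G st.1
        (fun i c => ConvP G R C i c ∨ (c = C ∧ R ≤ i ∧ i < R ∧ chainT G C R i)) :=
      gridIs_congr h.1 (fun i c => by
        constructor
        · exact Or.inl
        · rintro (hh | ⟨-, h2, h3, -⟩); exacts [hh, by omega])
    obtain ⟨hfin, hcnt⟩ := climb_spec G R C (by omega) R st.1 st.2 le_rfl
      (fun m hm1 hm2 => by omega) hg0
    refine ⟨gridIs_congr hfin (fun i c => ?_), by have := h.2; push_cast at hcnt ⊢; omega⟩
    rw [convP_trig ht i c]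
  · have ht' : trig (och G R C) = false := by
      cases hx : trig (och G R C)
      · rfl
      · exact absurd hx ht
    rw [if_neg (fun hh => ht (trig_iff.mpr hh))]
    exact ⟨gridIs_congr h.1 (fun i c => (convP_notrig ht' i c).symm), h.2⟩

theorem colLoop_spec {G : List (List Char)} {R : Nat} {st : List (List Char) × Int}
    (hR : R < G.length) (h : InvA G R 0 st) :
    ∀ C, C ≤ (G.getD R []).length →
      InvA G R C ((List.range C).foldl (aColStep R) st) := by
  intro C
  induction C with
  | zero => intro _; simpa using h
  | succ C ih =>
    intro hC
    rw [List.range_succ, List.foldl_append, List.foldl_cons, List.foldl_nil]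
    exact colStep_spec hR (by omega) (ih (by omega))

theorem outer_spec (G : List (List Char)) :
    ∀ R, R ≤ G.length →
      InvA G R 0 ((List.range R).foldl
        (fun st r => (List.range ((st.1.getD r []).length)).foldl (aColStep r) st) (G, 0)) := by
  intro R
  induction R with
  | zero =>
    intro _
    refine ⟨⟨rfl, fun i => rfl, fun i c => ⟨fun hs => absurd hs (convP_zero G i c),
      fun _ => rfl⟩⟩, by simp⟩
  | succ R ih =>
    intro hR
    rw [List.range_succ, List.foldl_append, List.foldl_cons, List.foldl_nil]
    set st := (List.range R).foldl
      (fun st r => (List.range ((st.1.getD r []).length)).foldl (aColStep r) st) (G, 0) with hst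
    have hinv := ih (by omega)
    have hRlt : R < G.length := by omega
    have hlen : (st.1.getD R []).length = (G.getD R []).length := hinv.1.2.1 R
    rw [hlen]
    have := colLoop_spec hRlt hinv ((G.getD R []).length) le_rfl
    exact ⟨gridIs_congr this.1 (fun i c => (convP_rowend i c).symm), this.2⟩

-- the final converted set is exactly lad-with-support-from-below
theorem suppL_iff : ∀ (M : List (List Char)) (c : Nat),
    suppL M c = true ↔
      ∃ r', r' < M.length ∧ trig ((M.getD r' []).getD c ' ') = true ∧
        ∀ m, m < r' → lad ((M.getD m []).getD c ' ') = true := by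
  intro M
  induction M with
  | nil => intro c; simp [suppL]
  | cons row rest ih =>
    intro c
    simp only [suppL]
    by_cases ht : trig (row.getD c ' ') = true
    · simp only [ht, if_true, true_iff]
      exact ⟨0, by simp, by simpa using ht, fun m hm => by omega⟩
    · have ht' : trig (row.getD c ' ') = false := by simpa using ht
      simp only [ht', Bool.false_eq_true, if_false]
      by_cases hl : lad (row.getD c ' ') = true
      · simp only [hl, if_true]
        rw [ih c]
        constructor
        · rintro ⟨r', h1, h2, h3⟩
          exact ⟨r' + 1, by simpa using h1, by simpa using h2, fun m hm => by
            cases m with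
            | zero => simpa using hl
            | succ m => simpa using h3 m (by omega)⟩
        · rintro ⟨r', h1, h2, h3⟩
          cases r' with
          | zero => simp only [List.getD_cons_zero] at h2; rw [h2] at ht'; simp at ht'
          | succ r' =>
            exact ⟨r', by simpa using h1, by simpa using h2, fun m hm => by
              simpa using h3 (m + 1) (by omega)⟩
      · have hl' : lad (row.getD c ' ') = false := by simpa using hl
        simp only [hl', Bool.false_eq_true, if_false, false_iff]
        rintro ⟨r', h1, h2, h3⟩
        cases r' with
        | zero => simp only [List.getD_cons_zero] at h2; rw [h2] at ht'; simp at ht'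
        | succ r' =>
          have := h3 0 (by omega)
          simp only [List.getD_cons_zero] at this
          rw [this] at hl'; simp at hl'

theorem getD_drop (G : List (List Char)) (a j : Nat) :
    (G.drop a).getD j [] = G.getD (a + j) [] := by
  rw [List.getD_eq_getElem?_getD, List.getD_eq_getElem?_getD, List.getElem?_drop]

theorem convP_final (G : List (List Char)) (i c : Nat) :
    ConvP G G.length 0 i c ↔
      (lad (och G i c) = true ∧ suppL (G.drop (i + 1)) c = true) := by
  rw [suppL_iff]
  constructor
  · rintro ⟨hl, r', h1, h2, h3, h4, h5⟩
    have hr : r' < G.length := by omega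
    refine ⟨hl, r' - (i + 1), by simp [List.length_drop]; omega, ?_, ?_⟩
    · rw [getD_drop]
      have : i + 1 + (r' - (i + 1)) = r' := by omega
      rw [this]; exact h4
    · intro m hm
      rw [getD_drop]
      exact h5 (i + 1 + m) (by omega) (by omega)
  · rintro ⟨hl, j, h1, h2, h3⟩
    rw [List.length_drop] at h1
    rw [getD_drop] at h2
    refine ⟨hl, i + 1 + j, by omega, by omega, Or.inl (by omega), h2, ?_⟩
    intro m hm1 hm2
    have := h3 (m - (i + 1)) (by omega)
    rw [getD_drop] at this
    have he : i + 1 + (m - (i + 1)) = m := by omega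
    rwa [he] at this

-- reference-shape lemmas
theorem refRow_length (rest : List (List Char)) :
    ∀ (cs : List Char) (c : Nat), (refRow rest cs c).length = cs.length := by
  intro cs
  induction cs with
  | nil => intro c; rfl
  | cons ch t ih => intro c; simp [refRow, ih]

theorem refRow_getD (rest : List (List Char)) :
    ∀ (cs : List Char) (c k : Nat), k < cs.length →
      (refRow rest cs c).getD k ' ' =
        (if lad (cs.getD k ' ') && suppL rest (c + k) then '9' else cs.getD k ' ') := by
  intro cs
  induction cs with
  | nil => intro c k h; simp at h
  | cons ch t ih =>
    intro c k hk
    cases k with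
    | zero => simp [refRow]
    | succ k =>
      have : c + (k + 1) = (c + 1) + k := by omega
      simp only [refRow, List.getD_cons_succ, this]
      exact ih (c + 1) k (by simpa using hk)

theorem refRows_length (M : List (List Char)) : (refRows M).length = M.length := by
  induction M with
  | nil => rfl
  | cons row rest ih => simp [refRows, ih]

theorem refRows_getD : ∀ (M : List (List Char)) (i : Nat), i < M.length →
    (refRows M).getD i [] = refRow (M.drop (i + 1)) (M.getD i []) 0 := by
  intro M
  induction M with
  | nil => intro i h; simp at h
  | cons row rest ih =>
    intro i hi
    cases i with
    | zero => simp [refRows]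
    | succ i => simpa [refRows] using ih i (by simpa using hi)

theorem count9_refRow (rest : List (List Char)) :
    ∀ (cs : List Char) (c : Nat),
      ((refRow rest cs c).count '9' : Int) = (cs.count '9' : Int) + refCntRow rest cs c := by
  intro cs
  induction cs with
  | nil => intro c; simp [refRow, refCntRow]
  | cons ch t ih =>
    intro c
    have ihc := ih (c + 1)
    simp only [refRow, refCntRow]
    by_cases h : (lad ch && suppL rest c) = true
    · have hl : lad ch = true := ((Bool.and_eq_true _ _).mp h).1
      have h9 : ('9' == ch) = false := by
        rcases lad_eq hl with rfl | rfl <;> rfl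
      rw [if_pos h, if_pos h]
      simp [List.count_cons, lad_ne_nine hl]
      push_cast at ihc ⊢
      omega
    · have h' : (lad ch && suppL rest c) = false := by
        cases hx : (lad ch && suppL rest c)
        · rfl
        · exact absurd hx h
      rw [if_neg (by simp [h']), if_neg (by simp [h'])]
      simp only [List.count_cons]
      push_cast at ihc ⊢
      omega

theorem nines_cons (row : List Char) (rest : List (List Char)) :
    nines (row :: rest) = row.count '9' + nines rest := by
  simp [nines]

theorem nines_refRows (M : List (List Char)) :
    (nines (refRows M) : Int) = (nines M : Int) + refCnt M := by
  induction M with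
  | nil => simp [nines, refRows, refCnt]
  | cons row rest ih =>
    rw [show refRows (row :: rest) = refRow rest row 0 :: refRows rest from rfl]
    rw [nines_cons, nines_cons, refCnt]
    have h0 := count9_refRow rest row 0
    push_cast at h0 ih ⊢
    omega

theorem a_eq_ref (L : List String) :
    upgrade_ladders L =
      ((refRows (L.map (fun r => r.toList))).map (fun row => String.mk row),
        refCnt (L.map (fun r => r.toList))) := by
  unfold upgrade_ladders
  set G := L.map (fun r => r.toList) with hG
  have hlen : L.length = G.length := by simp [hG]
  rw [hlen]
  simp only []
  obtain ⟨hgrid, hcnt⟩ := outer_spec G G.length le_rfl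
  set st := (List.range G.length).foldl
    (fun st r => (List.range ((st.1.getD r []).length)).foldl (aColStep r) st) (G, 0) with hst
  have hgeq : st.1 = refRows G := by
    apply List.ext_getElem
    · rw [hgrid.1, refRows_length]
    · intro i h1 h2
      have hiG : i < G.length := by rw [hgrid.1] at h1; exact h1
      have hrow1 : st.1[i] = st.1.getD i [] := (List.getD_eq_getElem st.1 [] h1).symm
      have hrow2 : (refRows G)[i] = (refRows G).getD i [] :=
        (List.getD_eq_getElem _ [] h2).symm
      rw [hrow1, hrow2, refRows_getD G i hiG]
      apply List.ext_getElem
      · rw [hgrid.2.1 i, refRow_length]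
      · intro c hc1 hc2
        have hcG : c < (G.getD i []).length := by rw [hgrid.2.1 i] at hc1; exact hc1
        rw [← List.getD_eq_getElem _ ' ' hc1, ← List.getD_eq_getElem _ ' ' hc2]
        rw [refRow_getD _ _ 0 c hcG]
        simp only [Nat.zero_add]
        have hchg : (if (lad ((G.getD i []).getD c ' ') && suppL (G.drop (i + 1)) c) = true
              then '9' else (G.getD i []).getD c ' ') =
            (if (lad (och G i c) && suppL (G.drop (i + 1)) c) = true
              then '9' else och G i c) := rfl
        rw [hchg]
        by_cases hcv : ConvP G G.length 0 i c
        · rw [(hgrid.2.2 i c).1 hcv]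
          obtain ⟨hl, hs⟩ := (convP_final G i c).mp hcv
          rw [hl, hs]
          simp
        · rw [(hgrid.2.2 i c).2 hcv]
          have hff : (lad (och G i c) && suppL (G.drop (i + 1)) c) = false := by
            cases hl : lad (och G i c)
            · rfl
            · cases hs : suppL (G.drop (i + 1)) c
              · rfl
              · exact absurd ((convP_final G i c).mpr ⟨hl, hs⟩) hcv
          rw [hff]
          simp
  rw [hgeq] at hcnt ⊢
  have hnn := nines_refRows G
  have hc2' : st.2 = refCnt G := by omega
  rw [hc2']

-- ===== VERDICT (by name: the statement is the Claim_ definition above) =====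
theorem upgrade_ladders_spec : Claim_equal_upgrade_ladders := by
  intro L _
  show upgrade_ladders L = upgrade_ladders_alt L
  rw [a_eq_ref, alt_eq_ref]
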